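-- pv_equiv track=rewrite | github.com/dvanani9/My-LeetCode-Solutions | 1102-path-with-maximum-minimum-value/1102-path-with-maximum-minimum-value.py | maximumMinimumPath
-- ===== SOURCE A (Python) =====
-- from typing import List
--
-- def maximumMinimumPath(A: List[List[int]]) -> int:
--     R, C = len(A), len(A[0])
--     p = [i for i in range(R * C)]
--
--     def find(x):
--         if p[x] != x:
--             p[x] = find(p[x])
--         return p[x]
--
--     def union(x, y):
--         px, py = find(x), find(y)
--         if px != py:
--             p[px] = py
--
--     points = [(x, y) for x in range(R) for y in range(C)]
--     points.sort(key=lambda x:A[x[0]][x[1]], reverse=True)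
--
--     visited = [[False] * C for _ in range(R)]
--     for x, y in points:
--         visited[x][y] = True
--
--         for nx, ny in [[x-1, y], [x, y+1], [x+1, y], [x, y-1]]:
--             if 0 <= nx < R and 0 <= ny < C and visited[nx][ny]:
--                 union(x * C + y, nx * C + ny)
--
--         if find(0) == find(R * C - 1):
--             return A[x][y]
--
--     return -1
-- ===== SOURCE B (Python) =====
-- from typing import List
--
-- def maximumMinimumPath(A: List[List[int]]) -> int:
--     R, C = len(A), len(A[0])
--     points = sorted(((x, y) for x in range(R) for y in range(C)),
--                     key=lambda p: A[p[0]][p[1]], reverse=True)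
--     label = {}  # cell id -> component label; a cell is "seen" iff it is a key
--     for x, y in points:
--         cid = x * C + y
--         label[cid] = cid
--         for nx, ny in ((x - 1, y), (x, y + 1), (x + 1, y), (x, y - 1)):
--             if 0 <= nx < R and 0 <= ny < C:
--                 l = label.get(nx * C + ny)
--                 if l is not None and l != cid:
--                     for k in label:
--                         if label[k] == l:
--                             label[k] = cid
--         if label.get(0) is not None and label.get(0) == label.get(R * C - 1):
--             return A[x][y]
--     return -1
-- ===== Notes on version B (the rewrite author's own statement) =====
-- stated objective: alternative
-- what changed: Replaced the path-compressed union-find (parent array, recursive find, separate visited grid) by connected-component labeling: a single dict maps each seen cell to a component label (serving also as the visited set), and a union relabels the neighbour's whole class in one pass; same descending sweep, different data structure and merge mechanism.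
import Mathlib
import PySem

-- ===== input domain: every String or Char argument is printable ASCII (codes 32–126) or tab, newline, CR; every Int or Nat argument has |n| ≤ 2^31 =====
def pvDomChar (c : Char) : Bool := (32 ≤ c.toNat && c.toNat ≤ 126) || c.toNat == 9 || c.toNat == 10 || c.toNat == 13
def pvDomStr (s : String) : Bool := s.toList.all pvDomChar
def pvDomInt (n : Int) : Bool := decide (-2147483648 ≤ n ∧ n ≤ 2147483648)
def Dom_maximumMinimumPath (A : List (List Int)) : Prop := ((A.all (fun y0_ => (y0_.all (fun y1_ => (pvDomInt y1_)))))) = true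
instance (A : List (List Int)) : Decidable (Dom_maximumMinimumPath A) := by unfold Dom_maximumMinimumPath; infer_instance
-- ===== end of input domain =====

-- B replaces A's path-compressed union-find + visited grid by connected-component
-- labeling over a single dict (label doubles as the visited set; union = relabel a class).


-- ===== PORT A =====
-- recursive find with path compression; fuel = length of the parent list (a guard
-- Python does not need: the chains are acyclic, see lemma pvFindA_spec below)
def pvFindA : Nat → List Int → Int → Int × List Int
  | 0, p, x => (x, p)
  | f + 1, p, x =>
    let px := PySem.List.pyGetD p x x
    if px ≠ x then
      let r := pvFindA f p px
      let p2 := PySem.List.pySetD r.2 x r.1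
      (PySem.List.pyGetD p2 x x, p2)            -- return p[x]
    else (px, p)

def pvUnionA (p : List Int) (x y : Int) : List Int :=
  let fx := pvFindA p.length p x
  let fy := pvFindA fx.2.length fx.2 y
  if fx.1 ≠ fy.1 then PySem.List.pySetD fy.2 fx.1 fy.1 else fy.2

def pvGetGrid (v : List (List Bool)) (x y : Int) : Bool :=
  PySem.List.pyGetD (PySem.List.pyGetD v x []) y false

def pvSetGrid (v : List (List Bool)) (x y : Int) : List (List Bool) :=
  PySem.List.pySetD v x (PySem.List.pySetD (PySem.List.pyGetD v x []) y true)

def pvLoopA (A : List (List Int)) (R C : Int) :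
    List (Int × Int) → List Int → List (List Bool) → Int
  | [], _, _ => -1
  | (x, y) :: rest, p, vis =>
    let vis' := pvSetGrid vis x y
    let p' := [(x - 1, y), (x, y + 1), (x + 1, y), (x, y - 1)].foldl
      (fun p (q : Int × Int) =>
        if 0 ≤ q.1 ∧ q.1 < R ∧ 0 ≤ q.2 ∧ q.2 < C ∧ pvGetGrid vis' q.1 q.2 then
          pvUnionA p (x * C + y) (q.1 * C + q.2)
        else p) p
    let f0 := pvFindA p'.length p' 0
    let fl := pvFindA f0.2.length f0.2 (R * C - 1)
    if f0.1 = fl.1 then PySem.List.pyGetD (PySem.List.pyGetD A x []) y 0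
    else pvLoopA A R C rest fl.2 vis'

def maximumMinimumPath (A : List (List Int)) : Int :=
  let R : Int := A.length
  let C : Int := (PySem.List.pyGetD A 0 []).length
  let p := PySem.List.pyRange 0 (R * C) 1
  let points := PySem.List.sorted
    ((PySem.List.pyRange 0 R 1).flatMap (fun x =>
      (PySem.List.pyRange 0 C 1).map (fun y => (x, y))))
    (fun q : Int × Int => PySem.List.pyGetD (PySem.List.pyGetD A q.1 []) q.2 0) true
  let visited := List.replicate R.toNat (List.replicate C.toNat false)
  pvLoopA A R C points p visited

-- ===== PORT B =====
-- 'for k in label: if label[k] == l: label[k] = cid'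
def pvRelabel (d : PySem.Dict Int Int) (l cid : Int) : PySem.Dict Int Int :=
  d.keys.foldl (fun d k => if d.getD k 0 = l then d.insert k cid else d) d

def pvLoopB (A : List (List Int)) (R C : Int) :
    List (Int × Int) → PySem.Dict Int Int → Int
  | [], _ => -1
  | (x, y) :: rest, d =>
    let cid := x * C + y
    let d1 := d.insert cid cid
    let d2 := [(x - 1, y), (x, y + 1), (x + 1, y), (x, y - 1)].foldl
      (fun d (q : Int × Int) =>
        if 0 ≤ q.1 ∧ q.1 < R ∧ 0 ≤ q.2 ∧ q.2 < C then
          match d.get? (q.1 * C + q.2) with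
          | none => d
          | some l => if l ≠ cid then pvRelabel d l cid else d
        else d) d1
    if (d2.get? 0).isSome ∧ d2.get? 0 = d2.get? (R * C - 1) then
      PySem.List.pyGetD (PySem.List.pyGetD A x []) y 0
    else pvLoopB A R C rest d2

def maximumMinimumPath_alt (A : List (List Int)) : Int :=
  let R : Int := A.length
  let C : Int := (PySem.List.pyGetD A 0 []).length
  let points := PySem.List.sorted
    ((PySem.List.pyRange 0 R 1).flatMap (fun x =>
      (PySem.List.pyRange 0 C 1).map (fun y => (x, y))))
    (fun q : Int × Int => PySem.List.pyGetD (PySem.List.pyGetD A q.1 []) q.2 0) true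
  pvLoopB A R C points PySem.Dict.empty

-- ===== PRECONDITION & SPEC =====
-- Pre_ excludes exactly the inputs where A raises an IndexError: an empty outer list
-- (reading the first row) and grids with a row shorter than the first row.
def Pre_maximumMinimumPath (A : List (List Int)) : Prop :=
  A ≠ [] ∧ ∀ row ∈ A, (PySem.List.pyGetD A 0 []).length ≤ row.length
instance (A : List (List Int)) : Decidable (Pre_maximumMinimumPath A) := by
  unfold Pre_maximumMinimumPath; infer_instance

def pvWitness_maximumMinimumPath : List (List Int) := [[5, 4], [1, 3]]

def Spec_maximumMinimumPath (A : List (List Int)) (out : Int) : Prop := out = maximumMinimumPath_alt A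
instance (A : List (List Int)) (out : Int) : Decidable (Spec_maximumMinimumPath A out) := by unfold Spec_maximumMinimumPath; infer_instance

-- ===== CLAIM (what is proved, stated in full; the proofs are below) =====
def Claim_equal_maximumMinimumPath : Prop := ∀ (A : List (List Int)), Dom_maximumMinimumPath A → Pre_maximumMinimumPath A → Spec_maximumMinimumPath A (maximumMinimumPath A)

-- ===== LEMMAS AND PROOFS =====

def pvPar (p : List Int) (x : Int) : Int := PySem.List.pyGetD p x x
def pvRt (p : List Int) (N : Nat) (x : Int) : Int := (pvPar p)^[N] x
def pvGood (p : List Int) (N : Nat) : Prop :=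
  p.length = N ∧
  (∀ x : Int, 0 ≤ x → x < (N : Int) → 0 ≤ pvPar p x ∧ pvPar p x < (N : Int)) ∧
  (∀ x : Int, 0 ≤ x → x < (N : Int) → pvPar p (pvRt p N x) = pvRt p N x)

lemma pvIter_in {f : Int → Int} {N : Nat}
    (hent : ∀ x : Int, 0 ≤ x → x < (N : Int) → 0 ≤ f x ∧ f x < (N : Int))
    {z : Int} (hz : 0 ≤ z ∧ z < (N : Int)) (k : Nat) :
    0 ≤ f^[k] z ∧ f^[k] z < (N : Int) := by
  induction k with
  | zero => simpa using hz
  | succ k ih => rw [Function.iterate_succ_apply']; exact hent _ ih.1 ih.2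

-- pigeonhole: a chain in [0,N) that reaches some fixpoint is at a fixpoint after N steps
lemma pvStab_pigeon (f : Int → Int) (N : Nat)
    (hent : ∀ x : Int, 0 ≤ x → x < (N : Int) → 0 ≤ f x ∧ f x < (N : Int))
    {z : Int} (hz : 0 ≤ z ∧ z < (N : Int))
    (hreach : ∃ k, f (f^[k] z) = f^[k] z) :
    f (f^[N] z) = f^[N] z := by
  classical
  let t := Nat.find hreach
  have ht : f (f^[t] z) = f^[t] z := Nat.find_spec hreach
  have hmin : ∀ k < t, f (f^[k] z) ≠ f^[k] z := fun k hk => Nat.find_min hreach hk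
  have htN : t ≤ N := by
    by_contra hgt
    push_neg at hgt
    have key : ∀ i j : Nat, i < j → j < t + 1 → f^[i] z ≠ f^[j] z := by
      intro i j hlt hj hij
      have hshift : f^[t] z = f^[t - j + i] z := by
        have h1 : f^[t] z = f^[t - j] (f^[j] z) := by
          rw [← Function.iterate_add_apply]; congr 1; omega
        rw [h1, ← hij, ← Function.iterate_add_apply]
      refine hmin (t - j + i) (by omega) ?_
      rw [← hshift]; exact ht
    have hinj : Set.InjOn (fun i => f^[i] z) ↑(Finset.range (t + 1)) := by
      intro i hi j hj hij
      simp only [Finset.coe_range, Set.mem_Iio] at hi hj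
      by_contra hne
      rcases Nat.lt_or_ge i j with h | h
      · exact key i j h hj hij
      · exact key j i (by omega) hi hij.symm
    have hcard := Finset.card_le_card_of_injOn (t := Finset.Ico (0 : Int) (N : Int)) (fun i => f^[i] z)
      (fun i _ => by
        have := pvIter_in hent hz i
        rw [Finset.mem_coe, Finset.mem_Ico]
        exact this) hinj
    rw [Finset.card_range, Int.card_Ico] at hcard
    omega
  have h2 : f^[N] z = f^[t] z := by
    have h3 : f^[(N - t) + t] z = f^[t] z := by
      rw [Function.iterate_add_apply]; exact Function.iterate_fixed ht _
    rwa [show N - t + t = N by omega] at h3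
  rw [h2]; exact ht

-- any reached fixpoint IS the root
lemma pvRt_of_reach {p : List Int} {N : Nat} (hG : pvGood p N) {z r : Int}
    (hz : 0 ≤ z ∧ z < (N : Int)) {k : Nat}
    (hit : (pvPar p)^[k] z = r) (hr : pvPar p r = r) : pvRt p N z = r := by
  have h1 : (pvPar p)^[N + k] z = r := by
    rw [Function.iterate_add_apply, hit]; exact Function.iterate_fixed hr _
  have h2 : (pvPar p)^[k + N] z = pvRt p N z := by
    rw [Function.iterate_add_apply]
    exact Function.iterate_fixed (hG.2.2 z hz.1 hz.2) _
  rw [← h1, ← h2]; congr 1; omega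

lemma pvGood_of_reach {p : List Int} {N : Nat} (hlen : p.length = N)
    (hent : ∀ x : Int, 0 ≤ x → x < (N : Int) → 0 ≤ pvPar p x ∧ pvPar p x < (N : Int))
    (hreach : ∀ z : Int, 0 ≤ z → z < (N : Int) → ∃ k, pvPar p ((pvPar p)^[k] z) = (pvPar p)^[k] z) :
    pvGood p N :=
  ⟨hlen, hent, fun z h1 h2 => pvStab_pigeon (pvPar p) N hent ⟨h1, h2⟩ (hreach z h1 h2)⟩

lemma pvRt_in {p : List Int} {N : Nat} (hG : pvGood p N) {z : Int}
    (hz : 0 ≤ z ∧ z < (N : Int)) : 0 ≤ pvRt p N z ∧ pvRt p N z < (N : Int) :=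
  pvIter_in hG.2.1 hz N

lemma pvRt_isRoot {p : List Int} {N : Nat} (hG : pvGood p N) {z : Int}
    (hz : 0 ≤ z ∧ z < (N : Int)) : pvPar p (pvRt p N z) = pvRt p N z :=
  hG.2.2 z hz.1 hz.2

lemma pvRt_of_isRoot {p : List Int} {N : Nat} {z : Int} (h : pvPar p z = z) :
    pvRt p N z = z := Function.iterate_fixed h _

lemma pvRt_par {p : List Int} {N : Nat} (hG : pvGood p N) {z : Int}
    (hz : 0 ≤ z ∧ z < (N : Int)) : pvRt p N (pvPar p z) = pvRt p N z := by
  have h1 : (pvPar p)^[N] (pvPar p z) = (pvPar p)^[N + 1] z := by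
    rw [Function.iterate_succ_apply]
  rw [pvRt, h1, Function.iterate_succ_apply']
  exact pvRt_isRoot hG hz

-- parent after a single in-range write, read at a non-negative index
lemma pvPar_set {p : List Int} {a v z : Int} (h0 : 0 ≤ a) (ha : a < p.length) (hz : 0 ≤ z) :
    pvPar (PySem.List.pySetD p a v) z = if z = a then v else pvPar p z := by
  have hae : a = ((a.toNat : Nat) : Int) := by omega
  have hze : z = ((z.toNat : Nat) : Int) := by omega
  by_cases h : z = a
  · rw [if_pos h, h, pvPar, hae,
      PySem.List.pyGetD_pySetD_natCast p a.toNat a.toNat v _ (by omega), if_pos rfl]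
  · rw [if_neg h, pvPar, pvPar, hze, hae,
      PySem.List.pyGetD_pySetD_natCast p a.toNat z.toNat v _ (by omega),
      if_neg (by omega), ← hze]
def pvREq (p p' : List Int) (N : Nat) : Prop :=
  ∀ z : Int, 0 ≤ z → z < (N : Int) → pvRt p' N z = pvRt p N z

-- needed to port A's find; also the root-compression lemma
lemma pvSet_rt {p : List Int} {N : Nat} (hG : pvGood p N) {x r : Int}
    (hx : 0 ≤ x ∧ x < (N : Int)) (hr : r = pvRt p N x) :
    pvGood (PySem.List.pySetD p x r) N ∧ pvREq p (PySem.List.pySetD p x r) N := by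
  set p' := PySem.List.pySetD p x r with hp'
  have hxlen : x < (p.length : Int) := by rw [hG.1]; exact hx.2
  have hlen' : p'.length = N := by rw [hp', PySem.List.length_pySetD, hG.1]
  have hpar' : ∀ z : Int, 0 ≤ z → pvPar p' z = if z = x then r else pvPar p z :=
    fun z hz => pvPar_set hx.1 hxlen hz
  have hent' : ∀ z : Int, 0 ≤ z → z < (N : Int) → 0 ≤ pvPar p' z ∧ pvPar p' z < (N : Int) := by
    intro z h1 h2
    rw [hpar' z h1]
    split_ifs with h
    · rw [hr]; exact pvRt_in hG hx
    · exact hG.2.1 z h1 h2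
  have hfix : ∀ z : Int, 0 ≤ z → z < (N : Int) → pvPar p' (pvRt p N z) = pvRt p N z := by
    intro z h1 h2
    have hrtin := pvRt_in hG ⟨h1, h2⟩
    rw [hpar' _ hrtin.1]
    split_ifs with h
    · -- the root of z is x itself: then r = rt x = rt (rt z) = rt z = x
      have : pvRt p N x = x := by
        rw [← h, pvRt_of_isRoot (pvRt_isRoot hG ⟨h1, h2⟩), h]
      rw [hr, this, h]
    · exact pvRt_isRoot hG ⟨h1, h2⟩
  have hreach : ∀ (m : Nat) (z : Int), 0 ≤ z → z < (N : Int) →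
      pvPar p ((pvPar p)^[m] z) = (pvPar p)^[m] z →
      ∃ k, (pvPar p')^[k] z = pvRt p N z := by
    intro m
    induction m with
    | zero =>
      intro z h1 h2 hstab
      exact ⟨0, by simpa using (pvRt_of_isRoot (N := N) hstab).symm⟩
    | succ m ih =>
      intro z h1 h2 hstab
      by_cases hroot : pvPar p z = z
      · exact ⟨0, by simpa using (pvRt_of_isRoot (N := N) hroot).symm⟩
      by_cases hzx : z = x
      · refine ⟨1, ?_⟩
        simp only [Function.iterate_one]
        rw [hpar' z h1, if_pos hzx, hr, hzx]
      · have hw := hG.2.1 z h1 h2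
        have hstab' : pvPar p ((pvPar p)^[m] (pvPar p z)) = (pvPar p)^[m] (pvPar p z) := by
          rw [← Function.iterate_succ_apply]; exact hstab
        obtain ⟨k, hk⟩ := ih (pvPar p z) hw.1 hw.2 hstab'
        refine ⟨k + 1, ?_⟩
        rw [Function.iterate_succ_apply, hpar' z h1, if_neg hzx, hk,
          pvRt_par hG ⟨h1, h2⟩]
  have hGood' : pvGood p' N := by
    refine pvGood_of_reach hlen' hent' ?_
    intro z h1 h2
    obtain ⟨k, hk⟩ := hreach N z h1 h2 (hG.2.2 z h1 h2)
    exact ⟨k, by rw [hk]; exact hfix z h1 h2⟩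
  refine ⟨hGood', ?_⟩
  intro z h1 h2
  obtain ⟨k, hk⟩ := hreach N z h1 h2 (hG.2.2 z h1 h2)
  exact pvRt_of_reach hGood' ⟨h1, h2⟩ hk (hfix z h1 h2)

-- writing root b into root a merges the two classes
lemma pvSet_merge {p : List Int} {N : Nat} (hG : pvGood p N) {a b : Int}
    (ha : 0 ≤ a ∧ a < (N : Int)) (hb : 0 ≤ b ∧ b < (N : Int))
    (hra : pvPar p a = a) (hrb : pvPar p b = b) (hab : a ≠ b) :
    pvGood (PySem.List.pySetD p a b) N ∧
    ∀ z : Int, 0 ≤ z → z < (N : Int) →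
      pvRt (PySem.List.pySetD p a b) N z = if pvRt p N z = a then b else pvRt p N z := by
  set p' := PySem.List.pySetD p a b with hp'
  have halen : a < (p.length : Int) := by rw [hG.1]; exact ha.2
  have hlen' : p'.length = N := by rw [hp', PySem.List.length_pySetD, hG.1]
  have hpar' : ∀ z : Int, 0 ≤ z → pvPar p' z = if z = a then b else pvPar p z :=
    fun z hz => pvPar_set ha.1 halen hz
  have hent' : ∀ z : Int, 0 ≤ z → z < (N : Int) → 0 ≤ pvPar p' z ∧ pvPar p' z < (N : Int) := by
    intro z h1 h2
    rw [hpar' z h1]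
    split_ifs with h
    · exact hb
    · exact hG.2.1 z h1 h2
  have hfix : ∀ z : Int, 0 ≤ z → z < (N : Int) →
      pvPar p' (if pvRt p N z = a then b else pvRt p N z) =
        (if pvRt p N z = a then b else pvRt p N z) := by
    intro z h1 h2
    have hrtin := pvRt_in hG ⟨h1, h2⟩
    split_ifs with h
    · rw [hpar' b hb.1, if_neg (Ne.symm hab), hrb]
    · rw [hpar' _ hrtin.1, if_neg h]
      exact pvRt_isRoot hG ⟨h1, h2⟩
  have hreach : ∀ (m : Nat) (z : Int), 0 ≤ z → z < (N : Int) →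
      pvPar p ((pvPar p)^[m] z) = (pvPar p)^[m] z →
      ∃ k, (pvPar p')^[k] z = (if pvRt p N z = a then b else pvRt p N z) := by
    intro m
    induction m with
    | zero =>
      intro z h1 h2 hstab
      have hz : pvRt p N z = z := pvRt_of_isRoot hstab
      by_cases hza : z = a
      · refine ⟨1, ?_⟩
        simp only [Function.iterate_one]
        rw [hpar' z h1, if_pos hza, hz, if_pos hza]
      · exact ⟨0, by simp [hz, hza]⟩
    | succ m ih =>
      intro z h1 h2 hstab
      by_cases hroot : pvPar p z = z
      · have hz : pvRt p N z = z := pvRt_of_isRoot hroot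
        by_cases hza : z = a
        · refine ⟨1, ?_⟩
          simp only [Function.iterate_one]
          rw [hpar' z h1, if_pos hza, hz, if_pos hza]
        · exact ⟨0, by simp [hz, hza]⟩
      · have hza : z ≠ a := by
          intro h
          rw [h] at hroot
          exact hroot hra
        have hw := hG.2.1 z h1 h2
        have hstab' : pvPar p ((pvPar p)^[m] (pvPar p z)) = (pvPar p)^[m] (pvPar p z) := by
          rw [← Function.iterate_succ_apply]; exact hstab
        obtain ⟨k, hk⟩ := ih (pvPar p z) hw.1 hw.2 hstab'
        refine ⟨k + 1, ?_⟩
        rw [Function.iterate_succ_apply, hpar' z h1, if_neg hza, hk,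
          pvRt_par hG ⟨h1, h2⟩]
  have hGood' : pvGood p' N := by
    refine pvGood_of_reach hlen' hent' ?_
    intro z h1 h2
    obtain ⟨k, hk⟩ := hreach N z h1 h2 (hG.2.2 z h1 h2)
    exact ⟨k, by rw [hk]; exact hfix z h1 h2⟩
  refine ⟨hGood', ?_⟩
  intro z h1 h2
  obtain ⟨k, hk⟩ := hreach N z h1 h2 (hG.2.2 z h1 h2)
  exact pvRt_of_reach hGood' ⟨h1, h2⟩ hk (hfix z h1 h2)

lemma pvFindA_root {p : List Int} {x : Int} (hroot : pvPar p x = x) (fuel : Nat) :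
    pvFindA fuel p x = (x, p) := by
  cases fuel with
  | zero => rfl
  | succ f =>
    have hpx : PySem.List.pyGetD p x x = pvPar p x := rfl
    simp only [pvFindA, hpx, hroot, ne_eq, not_true_eq_false, if_false]

lemma pvFind_spec {p : List Int} {N : Nat} :
    ∀ (m fuel : Nat) (x : Int), pvGood p N →
    0 ≤ x → x < (N : Int) →
    pvPar p ((pvPar p)^[m] x) = (pvPar p)^[m] x → m ≤ fuel →
    (pvFindA fuel p x).1 = pvRt p N x ∧
    pvGood (pvFindA fuel p x).2 N ∧
    pvREq p (pvFindA fuel p x).2 N ∧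
    (∀ i : Int, 0 ≤ i → pvPar (pvFindA fuel p x).2 i ≠ pvPar p i →
        pvPar p i ≠ i ∧ pvPar (pvFindA fuel p x).2 i = pvRt p N x ∧
        pvRt p N i = pvRt p N x) := by
  intro m
  induction m with
  | zero =>
    intro fuel x hG h1 h2 hstab _
    have hroot : pvPar p x = x := by simpa using hstab
    have hrt : pvRt p N x = x := pvRt_of_isRoot hroot
    rw [pvFindA_root hroot fuel]
    exact ⟨hrt.symm, hG, fun z _ _ => rfl, fun i _ hi => absurd rfl hi⟩
  | succ m ih =>
    intro fuel x hG h1 h2 hstab hle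
    by_cases hroot : pvPar p x = x
    · -- already a root: same as the base case, any fuel
      have hrt : pvRt p N x = x := pvRt_of_isRoot hroot
      rw [pvFindA_root hroot fuel]
      exact ⟨hrt.symm, hG, fun z _ _ => rfl, fun i _ hi => absurd rfl hi⟩
    · cases fuel with
      | zero => omega
      | succ f =>
        have hpx : PySem.List.pyGetD p x x = pvPar p x := rfl
        have hw := hG.2.1 x h1 h2
        have hstab' : pvPar p ((pvPar p)^[m] (pvPar p x)) = (pvPar p)^[m] (pvPar p x) := by
          rw [← Function.iterate_succ_apply]; exact hstab
        obtain ⟨hr1, hr2, hr3, hr4⟩ := ih f (pvPar p x) hG hw.1 hw.2 hstab' (by omega)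
        set r := pvFindA f p (pvPar p x) with hrdef
        have hrtpx : pvRt p N (pvPar p x) = pvRt p N x := pvRt_par hG ⟨h1, h2⟩
        have hr1' : r.1 = pvRt p N x := by rw [hr1, hrtpx]
        have hrteq : r.1 = pvRt r.2 N x := by rw [hr1', (hr3 x h1 h2).symm]
        obtain ⟨hG2, hRE2⟩ := pvSet_rt hr2 ⟨h1, h2⟩ hrteq
        have hxlen : x < (r.2.length : Int) := by rw [hr2.1]; exact h2
        have hparval : pvPar (PySem.List.pySetD r.2 x r.1) x = r.1 := by
          rw [pvPar_set h1 hxlen h1, if_pos rfl]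
        have hgoal : pvFindA (f + 1) p x =
            (PySem.List.pyGetD (PySem.List.pySetD r.2 x r.1) x x,
              PySem.List.pySetD r.2 x r.1) := by
          simp only [pvFindA, hpx, ← hrdef]
          rw [if_pos hroot]
        rw [hgoal]
        refine ⟨?_, hG2, ?_, ?_⟩
        · show pvPar (PySem.List.pySetD r.2 x r.1) x = pvRt p N x
          rw [hparval, hr1']
        · intro z hz1 hz2
          rw [hRE2 z hz1 hz2, hr3 z hz1 hz2]
        · intro i hi0 hi
          have hpi : pvPar (PySem.List.pySetD r.2 x r.1) i =
              if i = x then r.1 else pvPar r.2 i := pvPar_set h1 hxlen hi0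
          by_cases hix : i = x
          · subst hix
            rw [hpi, if_pos rfl, hr1']
            exact ⟨hroot, rfl, rfl⟩
          · rw [hpi, if_neg hix] at hi ⊢
            have h4 := hr4 i hi0 hi
            exact ⟨h4.1, by rw [h4.2.1, hrtpx], by rw [h4.2.2, hrtpx]⟩

lemma pvPar_out {p : List Int} {i : Int} (h0 : 0 ≤ i) (h : (p.length : Int) ≤ i) :
    pvPar p i = i := by
  rw [pvPar, PySem.List.pyGetD_of_nonneg p i h0, List.getD_eq_default]
  omega

lemma pvUnion_spec {p : List Int} {N : Nat} (hG : pvGood p N) {x y : Int}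
    (hx : 0 ≤ x ∧ x < (N : Int)) (hy : 0 ≤ y ∧ y < (N : Int)) :
    pvGood (pvUnionA p x y) N ∧
    (∀ z : Int, 0 ≤ z → z < (N : Int) → pvRt (pvUnionA p x y) N z =
      if pvRt p N z = pvRt p N x ∧ pvRt p N x ≠ pvRt p N y then pvRt p N y
      else pvRt p N z) ∧
    (∀ i : Int, 0 ≤ i → pvPar (pvUnionA p x y) i ≠ pvPar p i →
      (pvPar p i ≠ i ∨ i = pvRt p N x) ∧
      (pvPar (pvUnionA p x y) i = pvRt p N x ∨ pvPar (pvUnionA p x y) i = pvRt p N y) ∧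
      (pvRt p N i = pvRt p N x ∨ pvRt p N i = pvRt p N y)) := by
  have hlen : p.length = N := hG.1
  set fx := pvFindA p.length p x with hfx
  set fy := pvFindA fx.2.length fx.2 y with hfy
  have hu : pvUnionA p x y =
      if fx.1 ≠ fy.1 then PySem.List.pySetD fy.2 fx.1 fy.1 else fy.2 := rfl
  obtain ⟨h11, h12, h13, h14⟩ :=
    pvFind_spec N p.length x hG hx.1 hx.2 (hG.2.2 x hx.1 hx.2) (by omega)
  rw [← hfx] at h11 h12 h13 h14
  have hlen2 : fx.2.length = N := h12.1
  obtain ⟨h21, h22, h23, h24⟩ :=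
    pvFind_spec N fx.2.length y h12 hy.1 hy.2 (h12.2.2 y hy.1 hy.2) (by omega)
  rw [← hfy] at h21 h22 h23 h24
  have hlen3 : fy.2.length = N := h22.1
  have hrty : fy.1 = pvRt p N y := by rw [h21, h13 y hy.1 hy.2]
  have hrtxin := pvRt_in hG hx
  have hrtyin := pvRt_in hG hy
  have hrootx : pvPar p (pvRt p N x) = pvRt p N x := pvRt_isRoot hG hx
  have hrooty : pvPar p (pvRt p N y) = pvRt p N y := pvRt_isRoot hG hy
  have hrx2 : pvPar fx.2 (pvRt p N x) = pvRt p N x := by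
    have h : pvPar fx.2 (pvRt p N x) = pvPar p (pvRt p N x) := by
      by_contra h; exact (h14 _ hrtxin.1 h).1 hrootx
    rw [h, hrootx]
  have hry2 : pvPar fx.2 (pvRt p N y) = pvRt p N y := by
    have h : pvPar fx.2 (pvRt p N y) = pvPar p (pvRt p N y) := by
      by_contra h; exact (h14 _ hrtyin.1 h).1 hrooty
    rw [h, hrooty]
  have hrx3 : pvPar fy.2 (pvRt p N x) = pvRt p N x := by
    have h : pvPar fy.2 (pvRt p N x) = pvPar fx.2 (pvRt p N x) := by
      by_contra h; exact (h24 _ hrtxin.1 h).1 hrx2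
    rw [h, hrx2]
  have hry3 : pvPar fy.2 (pvRt p N y) = pvRt p N y := by
    have h : pvPar fy.2 (pvRt p N y) = pvPar fx.2 (pvRt p N y) := by
      by_contra h; exact (h24 _ hrtyin.1 h).1 hry2
    rw [h, hry2]
  -- a write anywhere means the index is in range
  have hWin : ∀ (q : List Int) (i : Int), q.length = N → 0 ≤ i → pvPar q i ≠ i →
      i < (N : Int) := by
    intro q i hql hi0 hne
    by_contra hge
    exact hne (pvPar_out hi0 (by omega))
  -- the combined write clause for the two finds
  have hW2 : ∀ i : Int, 0 ≤ i → pvPar fy.2 i ≠ pvPar p i →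
      (pvPar p i ≠ i) ∧
      (pvPar fy.2 i = pvRt p N x ∨ pvPar fy.2 i = pvRt p N y) ∧
      (pvRt p N i = pvRt p N x ∨ pvRt p N i = pvRt p N y) := by
    intro i hi0 hne
    by_cases h : pvPar fy.2 i = pvPar fx.2 i
    · rw [h] at hne ⊢
      obtain ⟨w1, w2, w3⟩ := h14 i hi0 hne
      exact ⟨w1, Or.inl w2, Or.inl w3⟩
    · obtain ⟨w1, w2, w3⟩ := h24 i hi0 h
      have hiN : i < (N : Int) := hWin fx.2 i hlen2 hi0 w1
      have hv : pvPar fy.2 i = pvRt p N y := by rw [w2, h13 y hy.1 hy.2]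
      have hrti : pvRt p N i = pvRt p N y := by
        rw [← h13 i hi0 hiN, w3, h13 y hy.1 hy.2]
      refine ⟨?_, Or.inr hv, Or.inr hrti⟩
      by_cases h' : pvPar fx.2 i = pvPar p i
      · rw [← h']; exact w1
      · exact (h14 i hi0 h').1
  by_cases hne : fx.1 = fy.1
  · -- roots already equal: no final write
    have hrr : pvRt p N x = pvRt p N y := by rw [← h11, hne, hrty]
    have hu2 : pvUnionA p x y = fy.2 := by rw [hu, if_neg (by simp [hne])]
    rw [hu2]
    refine ⟨h22, ?_, ?_⟩
    · intro z hz1 hz2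
      rw [if_neg (by simp [hrr]), h23 z hz1 hz2, h13 z hz1 hz2]
    · exact fun i hi0 hch => ⟨Or.inl (hW2 i hi0 hch).1, (hW2 i hi0 hch).2.1,
        (hW2 i hi0 hch).2.2⟩
  · -- distinct roots: p[rt x] := rt y
    have hrr : pvRt p N x ≠ pvRt p N y := by rw [← h11, ← hrty]; exact hne
    have hu2 : pvUnionA p x y = PySem.List.pySetD fy.2 (pvRt p N x) (pvRt p N y) := by
      rw [hu, if_pos (by simp [hne]), h11, hrty]
    obtain ⟨hGm, hRm⟩ := pvSet_merge h22
      (a := pvRt p N x) (b := pvRt p N y)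
      ⟨hrtxin.1, by omega⟩ ⟨hrtyin.1, by omega⟩ hrx3 hry3 hrr
    rw [hu2]
    refine ⟨hGm, ?_, ?_⟩
    · intro z hz1 hz2
      rw [hRm z hz1 hz2, h23 z hz1 hz2, h13 z hz1 hz2]
      split_ifs with hc1 hc2 hc2
      · rfl
      · exact absurd ⟨hc1, hrr⟩ hc2
      · exact absurd hc2.1 hc1
      · rfl
    · intro i hi0 hch
      have hxlen3 : pvRt p N x < (fy.2.length : Int) := by omega
      have hps : pvPar (PySem.List.pySetD fy.2 (pvRt p N x) (pvRt p N y)) i =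
          if i = pvRt p N x then pvRt p N y else pvPar fy.2 i :=
        pvPar_set hrtxin.1 hxlen3 hi0
      by_cases hirt : i = pvRt p N x
      · refine ⟨Or.inr hirt, Or.inr ?_, Or.inl ?_⟩
        · rw [hps, if_pos hirt]
        · rw [hirt, pvRt_of_isRoot hrootx]
      · rw [hps, if_neg hirt] at hch ⊢
        exact ⟨Or.inl (hW2 i hi0 hch).1, (hW2 i hi0 hch).2.1, (hW2 i hi0 hch).2.2⟩

lemma pvRelabel_fold (l cid : Int) :
    ∀ (ks : List Int) (d : PySem.Dict Int Int), ks.Nodup →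
    (∀ k ∈ ks, d.contains k = true) →
    (∀ k : Int, (ks.foldl (fun d k => if d.getD k 0 = l then d.insert k cid else d) d).get? k =
      if k ∈ ks ∧ d.get? k = some l then some cid else d.get? k) ∧
    (ks.foldl (fun d k => if d.getD k 0 = l then d.insert k cid else d) d).keys = d.keys := by
  intro ks
  induction ks with
  | nil => intro d _ _; exact ⟨fun k => by simp, rfl⟩
  | cons k0 t ih =>
    intro d hnd hcont
    have hc0 : d.contains k0 = true := hcont k0 (by simp)
    obtain ⟨v0, hv0⟩ : ∃ v, d.get? k0 = some v := by
      rcases h : d.get? k0 with _ | v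
      · rw [PySem.Dict.get?_eq_none_iff_contains] at h; rw [hc0] at h; cases h
      · exact ⟨v, rfl⟩
    set d1 := if d.getD k0 0 = l then d.insert k0 cid else d with hd1
    have hkeys1 : d1.keys = d.keys := by
      rw [hd1]; split_ifs with h
      · exact PySem.Dict.keys_insert_of_contains d cid hc0
      · rfl
    have hgd : d.getD k0 0 = v0 := by
      rw [PySem.Dict.getD_eq_get?_getD, hv0]; rfl
    have hget1 : ∀ k : Int, d1.get? k =
        if k = k0 ∧ d.get? k = some l then some cid else d.get? k := by
      intro k
      by_cases hvl : v0 = l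
      · rw [hd1, if_pos (by rw [hgd, hvl]), PySem.Dict.get?_insert]
        by_cases hk : k = k0
        · subst hk; rw [if_pos rfl, if_pos ⟨rfl, by rw [hv0, hvl]⟩]
        · rw [if_neg hk, if_neg (fun h => hk h.1)]
      · rw [hd1, if_neg (by rw [hgd]; exact hvl)]
        by_cases hk : k = k0
        · subst hk
          rw [if_neg (by rintro ⟨-, hl⟩; rw [hv0] at hl; exact hvl (Option.some.inj hl))]
        · rw [if_neg (fun h => hk h.1)]
    have hcont1 : ∀ k ∈ t, d1.contains k = true := by
      intro k hk
      rw [PySem.Dict.contains_iff_mem_keys, hkeys1, ← PySem.Dict.contains_iff_mem_keys]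
      exact hcont k (by simp [hk])
    obtain ⟨ihg, ihk⟩ := ih d1 hnd.of_cons hcont1
    have hk0t : k0 ∉ t := (List.nodup_cons.mp hnd).1
    refine ⟨?_, by rw [List.foldl_cons, ← hd1, ihk, hkeys1]⟩
    intro k
    rw [List.foldl_cons, ← hd1, ihg k]
    by_cases hkk0 : k = k0
    · subst hkk0
      have h1 : d1.get? k = if d.get? k = some l then some cid else d.get? k := by
        rw [hget1 k]
        by_cases hl : d.get? k = some l
        · rw [if_pos ⟨rfl, hl⟩, if_pos hl]
        · rw [if_neg (fun h => hl h.2), if_neg hl]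
      rw [if_neg (fun h => hk0t h.1), h1]
      by_cases hl : d.get? k = some l
      · rw [if_pos hl, if_pos ⟨by simp, hl⟩]
      · rw [if_neg hl, if_neg (fun h => hl h.2)]
    · have h1 : d1.get? k = d.get? k := by
        rw [hget1 k, if_neg (fun h => hkk0 h.1)]
      rw [h1]
      by_cases hkt : k ∈ t
      · by_cases hl : d.get? k = some l
        · rw [if_pos ⟨hkt, hl⟩, if_pos ⟨by simp [hkt], hl⟩]
        · rw [if_neg (fun h => hl h.2), if_neg (fun h => hl h.2)]
      · rw [if_neg (fun h => hkt h.1), if_neg (by simp [hkt, hkk0])]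

lemma pvRelabel_spec {d : PySem.Dict Int Int} (l cid : Int) (hnd : d.keys.Nodup) :
    (∀ k : Int, (pvRelabel d l cid).get? k =
      if d.get? k = some l then some cid else d.get? k) ∧
    (pvRelabel d l cid).keys = d.keys := by
  obtain ⟨hg, hk⟩ := pvRelabel_fold l cid d.keys d hnd
    (fun k hk => (PySem.Dict.contains_iff_mem_keys d k).mpr hk)
  refine ⟨?_, hk⟩
  intro k
  rw [pvRelabel, hg k]
  by_cases hl : d.get? k = some l
  · have hmem : k ∈ d.keys := by
      rw [← PySem.Dict.contains_iff_mem_keys]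
      rcases h : d.contains k with _ | _
      · rw [← PySem.Dict.get?_eq_none_iff_contains] at h; rw [h] at hl; cases hl
      · rfl
    rw [if_pos ⟨hmem, hl⟩, if_pos hl]
  · rw [if_neg (fun h => hl h.2), if_neg hl]

lemma pyGetD_set_general {α : Type} (xs : List α) {a z : Int} (v d : α)
    (h0 : 0 ≤ a) (ha : a < xs.length) (hz : 0 ≤ z) :
    PySem.List.pyGetD (PySem.List.pySetD xs a v) z d =
      if z = a then v else PySem.List.pyGetD xs z d := by
  have hae : a = ((a.toNat : Nat) : Int) := by omega
  have hze : z = ((z.toNat : Nat) : Int) := by omega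
  by_cases h : z = a
  · rw [if_pos h, h, hae,
      PySem.List.pyGetD_pySetD_natCast xs a.toNat a.toNat v _ (by omega), if_pos rfl]
  · rw [if_neg h, hze, hae,
      PySem.List.pyGetD_pySetD_natCast xs a.toNat z.toNat v _ (by omega),
      if_neg (by omega), ← hze]

lemma pvId_inj {C a b x y : Int} (hb : 0 ≤ b ∧ b < C) (hy : 0 ≤ y ∧ y < C) :
    a * C + b = x * C + y ↔ a = x ∧ b = y := by
  constructor
  · intro h
    have hC : 0 < C := by omega
    have h1 : (a - x) * C = y - b := by linear_combination h
    have hax : a = x := by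
      by_contra hax
      have h2 : 1 ≤ |a - x| := Int.one_le_abs (by omega)
      have h3 : C ≤ |a - x| * C := le_mul_of_one_le_left (by omega) h2
      have h4 : |a - x| * C = |(a - x) * C| := by
        rw [abs_mul, abs_of_pos hC]
      have h5 : |y - b| < C := by rw [abs_lt]; omega
      rw [h4, h1] at h3
      omega
    subst hax
    exact ⟨rfl, by omega⟩
  · rintro ⟨rfl, rfl⟩; rfl

lemma pvCid_in {R C x y : Int} (hx : 0 ≤ x ∧ x < R) (hy : 0 ≤ y ∧ y < C) :
    0 ≤ x * C + y ∧ x * C + y < R * C := by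
  constructor
  · have h1 : 0 ≤ x * C := mul_nonneg hx.1 (by omega)
    omega
  · have h1 : x * C + y < (x + 1) * C := by nlinarith
    have h2 : (x + 1) * C ≤ R * C := by
      apply mul_le_mul_of_nonneg_right (by omega) (by omega)
    omega

def pvGridInv (vis : List (List Bool)) (R C : Int) (V : List Int) : Prop :=
  ((vis.length : Int) = R) ∧
  (∀ a : Int, 0 ≤ a → a < R → ((PySem.List.pyGetD vis a []).length : Int) = C) ∧
  (∀ a b : Int, 0 ≤ a → a < R → 0 ≤ b → b < C →
    (pvGetGrid vis a b = true ↔ (a * C + b) ∈ V))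

lemma pvGridInv_init {R C : Int} (hR : 0 ≤ R) (hC : 0 ≤ C) :
    pvGridInv (List.replicate R.toNat (List.replicate C.toNat false)) R C [] := by
  refine ⟨by simp; omega, ?_, ?_⟩
  · intro a h1 h2
    rw [PySem.List.pyGetD_of_nonneg _ _ h1, List.getD_eq_getElem?_getD,
      List.getElem?_replicate]
    rw [if_pos (by omega)]
    simp
    omega
  · intro a b h1 h2 h3 h4
    rw [pvGetGrid, PySem.List.pyGetD_of_nonneg _ _ h1, List.getD_eq_getElem?_getD,
      List.getElem?_replicate, if_pos (by omega)]
    simp only [Option.getD_some]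
    rw [PySem.List.pyGetD_of_nonneg _ _ h3, List.getD_eq_getElem?_getD,
      List.getElem?_replicate, if_pos (by omega)]
    simp

lemma pvGridInv_set {vis : List (List Bool)} {R C : Int} {V : List Int}
    (hG : pvGridInv vis R C V) {x y : Int} (hx : 0 ≤ x ∧ x < R) (hy : 0 ≤ y ∧ y < C) :
    pvGridInv (pvSetGrid vis x y) R C (V ++ [x * C + y]) := by
  obtain ⟨hlen, hrow, hget⟩ := hG
  have hxlen : x < (vis.length : Int) := by omega
  have hylen : y < ((PySem.List.pyGetD vis x []).length : Int) := by
    rw [hrow x hx.1 hx.2]; exact hy.2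
  have houter : ∀ a : Int, 0 ≤ a →
      PySem.List.pyGetD (pvSetGrid vis x y) a [] =
        if a = x then PySem.List.pySetD (PySem.List.pyGetD vis x []) y true
        else PySem.List.pyGetD vis a [] := by
    intro a ha
    exact pyGetD_set_general vis _ _ hx.1 hxlen ha
  refine ⟨by rw [pvSetGrid, PySem.List.length_pySetD]; exact hlen, ?_, ?_⟩
  · intro a h1 h2
    rw [houter a h1]
    split_ifs with h
    · rw [PySem.List.length_pySetD]; rw [hrow x hx.1 hx.2]
    · exact hrow a h1 h2
  · intro a b h1 h2 h3 h4
    rw [pvGetGrid, houter a h1]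
    by_cases hax : a = x
    · subst hax
      rw [if_pos rfl]
      rw [pyGetD_set_general _ _ _ hy.1 hylen h3]
      by_cases hby : b = y
      · rw [if_pos hby, hby]
        simp
      · rw [if_neg hby]
        have hthis := hget a b h1 h2 h3 h4
        rw [pvGetGrid] at hthis
        rw [hthis]
        have hne : a * C + b ≠ a * C + y := by
          intro h; exact hby ((pvId_inj ⟨h3, h4⟩ hy).mp h).2
        simp [hne]
    · have hthis := hget a b h1 h2 h3 h4
      rw [pvGetGrid] at hthis
      rw [if_neg hax, hthis]
      have hne : a * C + b ≠ x * C + y := by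
        intro h; exact hax ((pvId_inj ⟨h3, h4⟩ hy).mp h).1
      simp [hne]

def pvInv (N : Nat) (p : List Int) (d : PySem.Dict Int Int) (V : List Int) : Prop :=
  pvGood p N ∧
  d.keys = V ∧
  (∀ i ∈ V, 0 ≤ i ∧ i < (N : Int)) ∧
  (∀ i : Int, 0 ≤ i → pvPar p i ≠ i → i ∈ V ∧ pvPar p i ∈ V) ∧
  (∀ i v : Int, d.get? i = some v → v ∈ V) ∧
  (∀ i j : Int, i ∈ V → j ∈ V → (pvRt p N i = pvRt p N j ↔ d.get? i = d.get? j))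

lemma pvRtV {N : Nat} {p : List Int} {d : PySem.Dict Int Int} {V : List Int}
    (hInv : pvInv N p d V) {i : Int} (hi : i ∈ V) : pvRt p N i ∈ V := by
  obtain ⟨hG, _, h3, h4, _, _⟩ := hInv
  have hin := h3 i hi
  have : ∀ k : Nat, (pvPar p)^[k] i ∈ V := by
    intro k
    induction k with
    | zero => simpa using hi
    | succ k ih =>
      rw [Function.iterate_succ_apply']
      have hkin := pvIter_in hG.2.1 hin k
      by_cases hr : pvPar p ((pvPar p)^[k] i) = (pvPar p)^[k] i
      · rw [hr]; exact ih
      · exact (h4 _ hkin.1 hr).2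
  exact this N

lemma pvRt_unvis {N : Nat} {p : List Int} {d : PySem.Dict Int Int} {V : List Int}
    (hInv : pvInv N p d V) {i : Int} (h0 : 0 ≤ i) (hni : i ∉ V) :
    pvPar p i = i ∧ pvRt p N i = i := by
  have hpar : pvPar p i = i := by
    by_contra h
    exact hni (hInv.2.2.2.1 i h0 h).1
  exact ⟨hpar, pvRt_of_isRoot hpar⟩

lemma pvGet?_mem {d : PySem.Dict Int Int} {V : List Int} (hkeys : d.keys = V)
    {i : Int} (hi : i ∈ V) : ∃ v, d.get? i = some v := by
  rcases h : d.get? i with _ | v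
  · exfalso
    rw [PySem.Dict.get?_eq_none_iff_contains] at h
    have hc := (PySem.Dict.contains_iff_mem_keys d i).mpr (by rw [hkeys]; exact hi)
    rw [h] at hc
    cases hc
  · exact ⟨v, rfl⟩

lemma pvGet?_none {d : PySem.Dict Int Int} {V : List Int} (hkeys : d.keys = V)
    {i : Int} (hi : i ∉ V) : d.get? i = none := by
  rw [PySem.Dict.get?_eq_none_iff_contains]
  rcases h : d.contains i with _ | _
  · rfl
  · rw [PySem.Dict.contains_iff_mem_keys, hkeys] at h
    exact absurd h hi

-- one neighbour: A unions, B relabels; the invariant is preserved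
lemma pvStep {N : Nat} {R C x y : Int} (hN : (N : Int) = R * C)
    (hx : 0 ≤ x ∧ x < R) (hy : 0 ≤ y ∧ y < C)
    {vis : List (List Bool)} {V' : List Int} (hGrid : pvGridInv vis R C V')
    (hndV : V'.Nodup) {p : List Int} {d : PySem.Dict Int Int}
    (hInv : pvInv N p d V') (hcidV : (x * C + y) ∈ V')
    (hcg : d.get? (x * C + y) = some (x * C + y)) (q : Int × Int) :
    pvInv N
      (if 0 ≤ q.1 ∧ q.1 < R ∧ 0 ≤ q.2 ∧ q.2 < C ∧ pvGetGrid vis q.1 q.2 then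
        pvUnionA p (x * C + y) (q.1 * C + q.2) else p)
      (if 0 ≤ q.1 ∧ q.1 < R ∧ 0 ≤ q.2 ∧ q.2 < C then
        match d.get? (q.1 * C + q.2) with
        | none => d
        | some l => if l ≠ (x * C + y) then pvRelabel d l (x * C + y) else d
      else d) V' ∧
    (if 0 ≤ q.1 ∧ q.1 < R ∧ 0 ≤ q.2 ∧ q.2 < C then
        match d.get? (q.1 * C + q.2) with
        | none => d
        | some l => if l ≠ (x * C + y) then pvRelabel d l (x * C + y) else d
      else d).get? (x * C + y) = some (x * C + y) := by
  set cid := x * C + y with hciddef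
  by_cases hb : 0 ≤ q.1 ∧ q.1 < R ∧ 0 ≤ q.2 ∧ q.2 < C
  · set nid := q.1 * C + q.2 with hniddef
    have hnidin : 0 ≤ nid ∧ nid < (N : Int) := by
      have := pvCid_in (R := R) (C := C) (x := q.1) (y := q.2) ⟨hb.1, hb.2.1⟩ ⟨hb.2.2.1, hb.2.2.2⟩
      omega
    have hcidin : 0 ≤ cid ∧ cid < (N : Int) := by
      have := pvCid_in (R := R) (C := C) (x := x) (y := y) hx hy
      omega
    have hgrid := hGrid.2.2 q.1 q.2 hb.1 hb.2.1 hb.2.2.1 hb.2.2.2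
    rw [← hniddef] at hgrid
    by_cases hmem : nid ∈ V'
    · -- visited neighbour: A unions, B sees the key
      have hgt : pvGetGrid vis q.1 q.2 = true := hgrid.mpr hmem
      rw [if_pos ⟨hb.1, hb.2.1, hb.2.2.1, hb.2.2.2, by rw [hgt]⟩, if_pos hb]
      obtain ⟨l, hl⟩ := pvGet?_mem hInv.2.1 hmem
      rw [hl]
      have hmatch : (match some l with
          | none => d
          | some l => if l ≠ cid then pvRelabel d l cid else d) =
          if l ≠ cid then pvRelabel d l cid else d := rfl
      rw [hmatch]
      obtain ⟨hG, hkeys, h3, h4, h5, h6⟩ := hInv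
      obtain ⟨hUG, hUrt, hUw⟩ := pvUnion_spec hG hcidin hnidin
      have hiff : l = cid ↔ pvRt p N cid = pvRt p N nid := by
        rw [show (pvRt p N cid = pvRt p N nid ↔ d.get? cid = d.get? nid) from
          h6 cid nid hcidV hmem, hcg, hl]
        constructor
        · intro h; rw [h]
        · intro h; exact (Option.some.inj h).symm
      by_cases hlc : l = cid
      · -- same class: B skips, A only compresses
        rw [if_neg (not_not_intro hlc)]
        have hreq : pvRt p N cid = pvRt p N nid := hiff.mp hlc
        have hrt' : ∀ z : Int, 0 ≤ z → z < (N : Int) →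
            pvRt (pvUnionA p cid nid) N z = pvRt p N z := by
          intro z h1 h2
          rw [hUrt z h1 h2, if_neg (by rw [hreq]; tauto)]
        refine ⟨⟨hUG, hkeys, h3, ?_, h5, ?_⟩, hcg⟩
        · intro i h0 hne
          by_cases hch : pvPar (pvUnionA p cid nid) i = pvPar p i
          · rw [hch] at hne ⊢
            exact h4 i h0 hne
          · obtain ⟨w1, w2, w3⟩ := hUw i h0 hch
            have hiV : i ∈ V' := by
              rcases w1 with h | h
              · exact (h4 i h0 h).1
              · rw [h]; exact pvRtV ⟨hG, hkeys, h3, h4, h5, h6⟩ hcidV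
            refine ⟨hiV, ?_⟩
            rcases w2 with h | h <;> rw [h]
            · exact pvRtV ⟨hG, hkeys, h3, h4, h5, h6⟩ hcidV
            · exact pvRtV ⟨hG, hkeys, h3, h4, h5, h6⟩ hmem
        · intro i j hi hj
          rw [hrt' i (h3 i hi).1 (h3 i hi).2, hrt' j (h3 j hj).1 (h3 j hj).2]
          exact h6 i j hi hj
      · -- distinct classes: A merges, B relabels l-class to cid
        rw [if_pos hlc]
        have hrne : pvRt p N cid ≠ pvRt p N nid := fun h => hlc (hiff.mpr h)
        have hndk : d.keys.Nodup := by rw [hkeys]; exact hndV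
        obtain ⟨hRg, hRk⟩ := pvRelabel_spec (d := d) l cid hndk
        have hrt' : ∀ z : Int, 0 ≤ z → z < (N : Int) →
            pvRt (pvUnionA p cid nid) N z =
              if pvRt p N z = pvRt p N cid then pvRt p N nid else pvRt p N z := by
          intro z h1 h2
          rw [hUrt z h1 h2]
          split_ifs with h1' h2' h2'
          · rfl
          · exact absurd h1'.1 h2'
          · exact absurd ⟨h2', hrne⟩ h1'
          · rfl
        -- classification facts on V'
        have hQ : ∀ i ∈ V', (d.get? i = some l ↔ pvRt p N i = pvRt p N nid) := by
          intro i hi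
          rw [h6 i nid hi hmem, hl]
        have hP : ∀ i ∈ V', (d.get? i = some cid ↔ pvRt p N i = pvRt p N cid) := by
          intro i hi
          rw [h6 i cid hi hcidV, hcg]
        have hBig : ∀ i ∈ V', 0 ≤ i → i < (N : Int) →
            ((pvRt (pvUnionA p cid nid) N i = pvRt p N nid ↔
              (pvRt p N i = pvRt p N cid ∨ pvRt p N i = pvRt p N nid)) ∧
             ((pvRelabel d l cid).get? i = some cid ↔
              (pvRt p N i = pvRt p N cid ∨ pvRt p N i = pvRt p N nid)) ∧
             (¬(pvRt p N i = pvRt p N cid ∨ pvRt p N i = pvRt p N nid) →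
               pvRt (pvUnionA p cid nid) N i = pvRt p N i ∧
               (pvRelabel d l cid).get? i = d.get? i)) := by
          intro i hi h1 h2
          refine ⟨?_, ?_, ?_⟩
          · rw [hrt' i h1 h2]
            split_ifs with h
            · simp [h]
            · constructor
              · intro hh; exact Or.inr hh
              · rintro (hh | hh)
                · exact absurd hh h
                · exact hh
          · rw [hRg i]
            by_cases hql : d.get? i = some l
            · rw [if_pos hql]
              simp only [true_iff]
              exact Or.inr ((hQ i hi).mp hql)
            · rw [if_neg hql]
              constructor
              · intro hh; exact Or.inl ((hP i hi).mp hh)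
              · rintro (hh | hh)
                · exact (hP i hi).mpr hh
                · exact absurd ((hQ i hi).mpr hh) hql
          · intro hnb
            constructor
            · rw [hrt' i h1 h2, if_neg (fun h => hnb (Or.inl h))]
            · rw [hRg i, if_neg (fun h => hnb (Or.inr ((hQ i hi).mp h)))]
        refine ⟨⟨hUG, by rw [hRk, hkeys], h3, ?_, ?_, ?_⟩, ?_⟩
        · intro i h0 hne
          by_cases hch : pvPar (pvUnionA p cid nid) i = pvPar p i
          · rw [hch] at hne ⊢
            exact h4 i h0 hne
          · obtain ⟨w1, w2, w3⟩ := hUw i h0 hch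
            have hiV : i ∈ V' := by
              rcases w1 with h | h
              · exact (h4 i h0 h).1
              · rw [h]; exact pvRtV ⟨hG, hkeys, h3, h4, h5, h6⟩ hcidV
            refine ⟨hiV, ?_⟩
            rcases w2 with h | h <;> rw [h]
            · exact pvRtV ⟨hG, hkeys, h3, h4, h5, h6⟩ hcidV
            · exact pvRtV ⟨hG, hkeys, h3, h4, h5, h6⟩ hmem
        · intro i v hv
          rw [hRg i] at hv
          by_cases hql : d.get? i = some l
          · rw [if_pos hql] at hv
            rw [← Option.some.inj hv]
            exact hcidV
          · rw [if_neg hql] at hv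
            exact h5 i v hv
        · intro i j hi hj
          obtain ⟨hB1i, hB2i, hB3i⟩ := hBig i hi (h3 i hi).1 (h3 i hi).2
          obtain ⟨hB1j, hB2j, hB3j⟩ := hBig j hj (h3 j hj).1 (h3 j hj).2
          by_cases hbi : pvRt p N i = pvRt p N cid ∨ pvRt p N i = pvRt p N nid <;>
            by_cases hbj : pvRt p N j = pvRt p N cid ∨ pvRt p N j = pvRt p N nid
          · rw [show pvRt (pvUnionA p cid nid) N i = pvRt p N nid from hB1i.mpr hbi,
              show pvRt (pvUnionA p cid nid) N j = pvRt p N nid from hB1j.mpr hbj,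
              show (pvRelabel d l cid).get? i = some cid from hB2i.mpr hbi,
              show (pvRelabel d l cid).get? j = some cid from hB2j.mpr hbj]
            simp
          · rw [show pvRt (pvUnionA p cid nid) N i = pvRt p N nid from hB1i.mpr hbi,
              show (pvRelabel d l cid).get? i = some cid from hB2i.mpr hbi,
              (hB3j hbj).1, (hB3j hbj).2]
            constructor
            · intro h; exact absurd (hB1j.mp ((hB3j hbj).1 ▸ h.symm)) hbj
            · intro h; exact absurd (hB2j.mp ((hB3j hbj).2 ▸ h.symm)) hbj
          · rw [show pvRt (pvUnionA p cid nid) N j = pvRt p N nid from hB1j.mpr hbj,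
              show (pvRelabel d l cid).get? j = some cid from hB2j.mpr hbj,
              (hB3i hbi).1, (hB3i hbi).2]
            constructor
            · intro h; exact absurd (hB1i.mp ((hB3i hbi).1 ▸ h)) hbi
            · intro h; exact absurd (hB2i.mp ((hB3i hbi).2 ▸ h)) hbi
          · rw [(hB3i hbi).1, (hB3i hbi).2, (hB3j hbj).1, (hB3j hbj).2]
            exact h6 i j hi hj
        · rw [hRg cid, if_neg (by rw [hcg]; intro h; exact hlc (Option.some.inj h).symm)]
          exact hcg
    · -- unvisited neighbour: both sides skip
      have hgf : pvGetGrid vis q.1 q.2 = false := by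
        rcases hgv : pvGetGrid vis q.1 q.2 with _ | _
        · rfl
        · exact absurd (hgrid.mp hgv) hmem
      rw [if_neg (by rw [hgf]; simp), if_pos hb, pvGet?_none hInv.2.1 hmem]
      exact ⟨hInv, hcg⟩
  · rw [if_neg (by tauto), if_neg hb]
    exact ⟨hInv, hcg⟩

def pvFoldA (R C x y : Int) (vis : List (List Bool)) (nbs : List (Int × Int))
    (p : List Int) : List Int :=
  nbs.foldl (fun (p : List Int) (q : Int × Int) =>
    if 0 ≤ q.1 ∧ q.1 < R ∧ 0 ≤ q.2 ∧ q.2 < C ∧ pvGetGrid vis q.1 q.2 then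
      pvUnionA p (x * C + y) (q.1 * C + q.2) else p) p

def pvFoldB (R C x y : Int) (nbs : List (Int × Int)) (d : PySem.Dict Int Int) :
    PySem.Dict Int Int :=
  nbs.foldl (fun (d : PySem.Dict Int Int) (q : Int × Int) =>
    if 0 ≤ q.1 ∧ q.1 < R ∧ 0 ≤ q.2 ∧ q.2 < C then
      match d.get? (q.1 * C + q.2) with
      | none => d
      | some l => if l ≠ (x * C + y) then pvRelabel d l (x * C + y) else d
    else d) d

lemma pvNbrFold {N : Nat} {R C x y : Int} (hN : (N : Int) = R * C)
    (hx : 0 ≤ x ∧ x < R) (hy : 0 ≤ y ∧ y < C)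
    {vis : List (List Bool)} {V' : List Int} (hGrid : pvGridInv vis R C V')
    (hndV : V'.Nodup) :
    ∀ (nbs : List (Int × Int)) (p : List Int) (d : PySem.Dict Int Int),
    pvInv N p d V' → (x * C + y) ∈ V' → d.get? (x * C + y) = some (x * C + y) →
    pvInv N (pvFoldA R C x y vis nbs p) (pvFoldB R C x y nbs d) V' ∧
    (pvFoldB R C x y nbs d).get? (x * C + y) = some (x * C + y) := by
  intro nbs
  induction nbs with
  | nil => intro p d hInv hm hg; exact ⟨hInv, hg⟩
  | cons q t ih =>
    intro p d hInv hm hg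
    obtain ⟨hInv', hg'⟩ := pvStep hN hx hy hGrid hndV hInv hm hg q
    rw [pvFoldA, pvFoldB, List.foldl_cons, List.foldl_cons]
    exact ih _ _ hInv' hm hg'

lemma pvInsert {N : Nat} {p : List Int} {d : PySem.Dict Int Int} {V : List Int}
    (hInv : pvInv N p d V) {cid : Int} (hcin : 0 ≤ cid ∧ cid < (N : Int))
    (hcV : cid ∉ V) :
    pvInv N p (d.insert cid cid) (V ++ [cid]) ∧
    (d.insert cid cid).get? cid = some cid := by
  obtain ⟨hG, hkeys, h3, h4, h5, h6⟩ := hInv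
  have hcont : d.contains cid = false := by
    rcases h : d.contains cid with _ | _
    · rfl
    · rw [PySem.Dict.contains_iff_mem_keys, hkeys] at h
      exact absurd h hcV
  have hget : ∀ k : Int, (d.insert cid cid).get? k =
      if k = cid then some cid else d.get? k := fun k =>
    PySem.Dict.get?_insert d cid k cid
  have hrtcid : pvRt p N cid = cid :=
    (pvRt_unvis ⟨hG, hkeys, h3, h4, h5, h6⟩ hcin.1 hcV).2
  refine ⟨⟨hG, ?_, ?_, ?_, ?_, ?_⟩, by rw [hget, if_pos rfl]⟩
  · rw [PySem.Dict.keys_insert_of_not_contains d cid hcont, hkeys]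
  · intro i hi
    rcases List.mem_append.mp hi with h | h
    · exact h3 i h
    · simp at h; omega
  · intro i h0 hne
    obtain ⟨hi1, hi2⟩ := h4 i h0 hne
    exact ⟨List.mem_append_left _ hi1, List.mem_append_left _ hi2⟩
  · intro i v hv
    rw [hget] at hv
    by_cases hic : i = cid
    · rw [if_pos hic] at hv
      simp at hv
      simp [hv]
    · rw [if_neg hic] at hv
      exact List.mem_append_left _ (h5 i v hv)
  · intro i j hi hj
    rw [hget i, hget j]
    rcases List.mem_append.mp hi with hi' | hi' <;>
      rcases List.mem_append.mp hj with hj' | hj'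
    · have hic : i ≠ cid := fun h => hcV (h ▸ hi')
      have hjc : j ≠ cid := fun h => hcV (h ▸ hj')
      rw [if_neg hic, if_neg hjc]
      exact h6 i j hi' hj'
    · simp at hj'
      subst hj'
      have hic : i ≠ j := fun h => hcV (h ▸ hi')
      rw [if_neg hic, if_pos rfl, hrtcid]
      have hrti : pvRt p N i ∈ V := pvRtV ⟨hG, hkeys, h3, h4, h5, h6⟩ hi'
      obtain ⟨v, hv⟩ := pvGet?_mem hkeys hi'
      have hvV : v ∈ V := h5 i v hv
      constructor
      · intro h; exact absurd (h ▸ hrti) hcV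
      · intro h
        rw [hv] at h
        exact absurd ((Option.some.inj h) ▸ hvV) hcV
    · simp at hi'
      subst hi'
      have hjc : j ≠ i := fun h => hcV (h ▸ hj')
      rw [if_neg hjc, if_pos rfl, hrtcid]
      have hrtj : pvRt p N j ∈ V := pvRtV ⟨hG, hkeys, h3, h4, h5, h6⟩ hj'
      obtain ⟨v, hv⟩ := pvGet?_mem hkeys hj'
      have hvV : v ∈ V := h5 j v hv
      constructor
      · intro h; exact absurd (h.symm ▸ hrtj) hcV
      · intro h
        rw [hv] at h
        exact absurd ((Option.some.inj h.symm) ▸ hvV) hcV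
    · simp at hi' hj'
      subst hi'; subst hj'
      simp

lemma pvCheck {N : Nat} {p : List Int} {d : PySem.Dict Int Int} {V : List Int}
    (hInv : pvInv N p d V) (hne : V ≠ []) :
    (pvRt p N 0 = pvRt p N ((N : Int) - 1)) ↔
      ((d.get? 0).isSome ∧ d.get? 0 = d.get? ((N : Int) - 1)) := by
  obtain ⟨hG, hkeys, h3, h4, h5, h6⟩ := hInv
  have hInv' : pvInv N p d V := ⟨hG, hkeys, h3, h4, h5, h6⟩
  have hN1 : 1 ≤ N := by
    rcases V with _ | ⟨i, V0⟩
    · exact absurd rfl hne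
    · have := h3 i (by simp)
      omega
  have h0r : (0 : Int) ≤ 0 ∧ (0 : Int) < (N : Int) := by omega
  have hlr : (0 : Int) ≤ (N : Int) - 1 ∧ (N : Int) - 1 < (N : Int) := by omega
  by_cases h0 : (0 : Int) ∈ V
  · by_cases h1 : ((N : Int) - 1) ∈ V
    · obtain ⟨v0, hv0⟩ := pvGet?_mem hkeys h0
      rw [h6 0 _ h0 h1]
      constructor
      · intro h; exact ⟨by rw [hv0]; rfl, h⟩
      · intro h; exact h.2
    · -- target unvisited: its root is itself, not a visited root
      have hrl := pvRt_unvis hInv' hlr.1 h1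
      have hr0 : pvRt p N 0 ∈ V := pvRtV hInv' h0
      rw [pvGet?_none hkeys h1]
      obtain ⟨v0, hv0⟩ := pvGet?_mem hkeys h0
      constructor
      · intro h
        rw [hrl.2] at h
        exact absurd (h ▸ hr0) h1
      · intro h
        rw [hv0] at h
        cases h.2
  · have hr0 := pvRt_unvis hInv' h0r.1 h0
    rw [pvGet?_none hkeys h0]
    constructor
    · intro h
      rw [hr0.2] at h
      by_cases h1 : ((N : Int) - 1) ∈ V
      · have := pvRtV hInv' h1
        rw [← h] at this
        exact absurd this h0
      · have hrl := pvRt_unvis hInv' hlr.1 h1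
        rw [hrl.2] at h
        -- then N = 1 and V is a nonempty subset of {0}: contradiction
        have : (N : Int) = 1 := by omega
        rcases V with _ | ⟨i, V0⟩
        · exact absurd rfl hne
        · have hi := h3 i (by simp)
          have hzero : i = 0 := by omega
          exact absurd (show (0 : Int) ∈ i :: V0 by simp [hzero]) h0
    · intro h
      cases h.1

lemma pvLoop_eq {A : List (List Int)} {R C : Int} {N : Nat} (hN : (N : Int) = R * C) :
    ∀ (pts : List (Int × Int)) (p : List Int) (d : PySem.Dict Int Int)
      (vis : List (List Bool)) (V : List Int),
    pvInv N p d V → pvGridInv vis R C V → V.Nodup →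
    (∀ q ∈ pts, 0 ≤ q.1 ∧ q.1 < R ∧ 0 ≤ q.2 ∧ q.2 < C ∧ (q.1 * C + q.2) ∉ V) →
    pts.Nodup →
    pvLoopA A R C pts p vis = pvLoopB A R C pts d := by
  intro pts
  induction pts with
  | nil => intro p d vis V _ _ _ _ _; rfl
  | cons xy rest ih =>
    obtain ⟨x, y⟩ := xy
    intro p d vis V hInv hGrid hnd hq hndp
    obtain ⟨hx1, hx2, hy1, hy2, hcV⟩ := hq (x, y) (by simp)
    have hx : 0 ≤ x ∧ x < R := ⟨hx1, hx2⟩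
    have hy : 0 ≤ y ∧ y < C := ⟨hy1, hy2⟩
    set cid := x * C + y with hciddef
    have hcin : 0 ≤ cid ∧ cid < (N : Int) := by
      have := pvCid_in (R := R) (C := C) hx hy
      omega
    set vis' := pvSetGrid vis x y with hvis'
    set V' := V ++ [cid] with hV'
    have hGrid' : pvGridInv vis' R C V' := pvGridInv_set hGrid hx hy
    have hndV' : V'.Nodup := by
      rw [hV', List.nodup_append]
      refine ⟨hnd, List.nodup_singleton _, ?_⟩
      intro a ha b hb
      rw [List.mem_singleton] at hb
      subst hb
      exact fun h => hcV (h ▸ ha)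
    obtain ⟨hInv1, hg1⟩ := pvInsert hInv hcin hcV
    have hcmem : cid ∈ V' := by simp [hV']
    set nbs : List (Int × Int) := [(x - 1, y), (x, y + 1), (x + 1, y), (x, y - 1)]
      with hnbs
    obtain ⟨hInv2, hg2⟩ := pvNbrFold hN hx hy hGrid' hndV' nbs p (d.insert cid cid)
      hInv1 hcmem hg1
    set pA := pvFoldA R C x y vis' nbs p with hpA
    set d2 := pvFoldB R C x y nbs (d.insert cid cid) with hd2
    set f0 := pvFindA pA.length pA 0 with hf0
    set fl := pvFindA f0.2.length f0.2 (R * C - 1) with hfl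
    have hA : pvLoopA A R C ((x, y) :: rest) p vis =
        if f0.1 = fl.1 then PySem.List.pyGetD (PySem.List.pyGetD A x []) y 0
        else pvLoopA A R C rest fl.2 vis' := rfl
    have hB : pvLoopB A R C ((x, y) :: rest) d =
        if (d2.get? 0).isSome ∧ d2.get? 0 = d2.get? (R * C - 1) then
          PySem.List.pyGetD (PySem.List.pyGetD A x []) y 0
        else pvLoopB A R C rest d2 := rfl
    have hN1 : 1 ≤ N := by omega
    have h0in : (0 : Int) ≤ 0 ∧ (0 : Int) < (N : Int) := by omega
    have hlin : (0 : Int) ≤ (N : Int) - 1 ∧ (N : Int) - 1 < (N : Int) := by omega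
    have hlenA : pA.length = N := hInv2.1.1
    obtain ⟨hs01, hs02, hs03, hs04⟩ :=
      pvFind_spec N pA.length 0 hInv2.1 h0in.1 h0in.2
        (hInv2.1.2.2 0 h0in.1 h0in.2) (by omega)
    rw [← hf0] at hs01 hs02 hs03 hs04
    have hlen0 : f0.2.length = N := hs02.1
    obtain ⟨hsl1, hsl2, hsl3, hsl4⟩ :=
      pvFind_spec N f0.2.length ((N : Int) - 1) hs02 hlin.1 hlin.2
        (hs02.2.2 _ hlin.1 hlin.2) (by omega)
    have hRC1 : R * C - 1 = (N : Int) - 1 := by omega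
    rw [← hRC1] at hsl1 hsl2 hsl3 hsl4
    rw [← hfl] at hsl1 hsl2 hsl3 hsl4
    have hcondA : f0.1 = fl.1 ↔ pvRt pA N 0 = pvRt pA N ((N : Int) - 1) := by
      rw [hs01, hsl1, hRC1, hs03 _ hlin.1 hlin.2]
    have hVne : V' ≠ [] := by simp [hV']
    have hcondB := pvCheck hInv2 hVne
    rw [hA, hB]
    by_cases hcond : f0.1 = fl.1
    · rw [if_pos hcond, if_pos (by rw [hRC1]; exact hcondB.mp (hcondA.mp hcond))]
    · rw [if_neg hcond,
        if_neg (by rw [hRC1]; exact fun h => hcond (hcondA.mpr (hcondB.mpr h)))]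
      -- recurse: transfer the invariant to the state after the two finds
      have hInvl : pvInv N fl.2 d2 V' := by
        obtain ⟨hG2, hk2, h32, h42, h52, h62⟩ := hInv2
        have hInv2' : pvInv N pA d2 V' := ⟨hG2, hk2, h32, h42, h52, h62⟩
        refine ⟨hsl2, hk2, h32, ?_, h52, ?_⟩
        · intro i h0 hne
          by_cases hc1 : pvPar fl.2 i = pvPar f0.2 i
          · rw [hc1] at hne ⊢
            by_cases hc2 : pvPar f0.2 i = pvPar pA i
            · rw [hc2] at hne ⊢
              exact h42 i h0 hne
            · obtain ⟨w1, w2, w3⟩ := hs04 i h0 hc2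
              have hiV : i ∈ V' := (h42 i h0 w1).1
              refine ⟨hiV, ?_⟩
              rw [w2, ← w3]
              exact pvRtV hInv2' hiV
          · obtain ⟨w1, w2, w3⟩ := hsl4 i h0 hc1
            have hiV : i ∈ V' := by
              by_cases hc2 : pvPar f0.2 i = pvPar pA i
              · rw [hc2] at w1
                exact (h42 i h0 w1).1
              · exact (h42 i h0 (hs04 i h0 hc2).1).1
            refine ⟨hiV, ?_⟩
            have hiin : 0 ≤ i ∧ i < (N : Int) := h32 i hiV
            rw [w2, ← w3, hs03 i hiin.1 hiin.2]
            exact pvRtV hInv2' hiV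
        · intro i j hi hj
          have hiin := h32 i hi
          have hjin := h32 j hj
          rw [hsl3 i hiin.1 hiin.2, hsl3 j hjin.1 hjin.2,
            hs03 i hiin.1 hiin.2, hs03 j hjin.1 hjin.2]
          exact h62 i j hi hj
      refine ih fl.2 d2 vis' V' hInvl hGrid' hndV' ?_ hndp.of_cons
      intro q hqr
      obtain ⟨hq1, hq2, hq3, hq4, hq5⟩ := hq q (by simp [hqr])
      refine ⟨hq1, hq2, hq3, hq4, ?_⟩
      rw [hV']
      simp only [List.mem_append, List.mem_singleton]
      rintro (h | h)
      · exact hq5 h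
      · have := (pvId_inj (C := C) ⟨hq3, hq4⟩ hy).mp h
        have hxyq : q = (x, y) := by
          obtain ⟨q1, q2⟩ := q
          simp_all
        have := (List.nodup_cons.mp hndp).1
        rw [← hxyq] at this
        exact this hqr

lemma pvBase_nodup (R C : Int) :
    ((PySem.List.pyRange 0 R 1).flatMap (fun x =>
      (PySem.List.pyRange 0 C 1).map (fun y => ((x, y) : Int × Int)))).Nodup := by
  rw [List.nodup_flatMap]
  constructor
  · intro x _
    exact (PySem.List.nodup_pyRange_one 0 C).map (fun a b h => by
      simpa using congrArg Prod.snd h)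
  · have hnd := PySem.List.nodup_pyRange_one 0 R
    refine List.Pairwise.imp ?_ hnd
    intro a b hne
    intro q hqa hqb
    simp only [List.mem_map] at hqa hqb
    obtain ⟨y1, -, h1⟩ := hqa
    obtain ⟨y2, -, h2⟩ := hqb
    apply hne
    rw [← h1] at h2
    have := congrArg Prod.fst h2
    simpa using this.symm

lemma pvPar_init {n z : Int} (hz : 0 ≤ z) :
    pvPar (PySem.List.pyRange 0 n 1) z = z := by
  rw [pvPar, PySem.List.pyGetD_of_nonneg _ _ hz, List.getD_eq_getElem?_getD,
    PySem.List.getElem?_pyRange_one]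
  split_ifs with h
  · simp; omega
  · rfl

lemma pvGood_init {n : Int} (hn : 0 ≤ n) :
    pvGood (PySem.List.pyRange 0 n 1) n.toNat := by
  have hpar : ∀ z : Int, 0 ≤ z → pvPar (PySem.List.pyRange 0 n 1) z = z :=
    fun z hz => pvPar_init hz
  have hit : ∀ (k : Nat) (z : Int), 0 ≤ z →
      (pvPar (PySem.List.pyRange 0 n 1))^[k] z = z :=
    fun k z hz => Function.iterate_fixed (hpar z hz) k
  refine ⟨by rw [PySem.List.length_pyRange_one]; omega, ?_, ?_⟩
  · intro z h1 h2
    rw [hpar z h1]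
    omega
  · intro z h1 h2
    rw [pvRt, hit _ z h1, hpar z h1]

lemma pvInv_init {n : Int} (hn : 0 ≤ n) :
    pvInv n.toNat (PySem.List.pyRange 0 n 1) PySem.Dict.empty [] := by
  refine ⟨pvGood_init hn, PySem.Dict.keys_empty, by simp, ?_, ?_, by simp⟩
  · intro i h0 hne
    exact absurd (pvPar_init h0) hne
  · intro i v hv
    rw [PySem.Dict.get?_empty] at hv
    cases hv

lemma pvMain_eq (A : List (List Int)) : maximumMinimumPath A = maximumMinimumPath_alt A := by
  have hR : (0 : Int) ≤ (A.length : Int) := by positivity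
  have hC : (0 : Int) ≤ ((PySem.List.pyGetD A 0 []).length : Int) := by positivity
  set R : Int := (A.length : Int) with hRdef
  set C : Int := ((PySem.List.pyGetD A 0 []).length : Int) with hCdef
  have hn : 0 ≤ R * C := mul_nonneg hR hC
  have hN : (((R * C).toNat : Nat) : Int) = R * C := Int.toNat_of_nonneg hn
  set pts := PySem.List.sorted
    ((PySem.List.pyRange 0 R 1).flatMap (fun x =>
      (PySem.List.pyRange 0 C 1).map (fun y => ((x, y) : Int × Int))))
    (fun q : Int × Int => PySem.List.pyGetD (PySem.List.pyGetD A q.1 []) q.2 0) true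
    with hptsdef
  have hmem : ∀ q ∈ pts, 0 ≤ q.1 ∧ q.1 < R ∧ 0 ≤ q.2 ∧ q.2 < C ∧
      (q.1 * C + q.2) ∉ ([] : List Int) := by
    intro q hq
    rw [hptsdef, PySem.List.mem_sorted, List.mem_flatMap] at hq
    obtain ⟨x, hx, hq⟩ := hq
    rw [List.mem_map] at hq
    obtain ⟨y, hy, rfl⟩ := hq
    rw [PySem.List.mem_pyRange_one] at hx hy
    simp only [List.not_mem_nil, not_false_eq_true, and_true]
    exact ⟨hx.1, hx.2, hy.1, hy.2⟩
  have hnd : pts.Nodup := by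
    rw [hptsdef]
    exact (PySem.List.sorted_perm _ _ _).symm.nodup (pvBase_nodup R C)
  show pvLoopA A R C pts (PySem.List.pyRange 0 (R * C) 1)
      (List.replicate R.toNat (List.replicate C.toNat false)) =
    pvLoopB A R C pts PySem.Dict.empty
  exact pvLoop_eq hN pts _ _ _ [] (pvInv_init hn) (pvGridInv_init hR hC)
    List.nodup_nil hmem hnd


-- ===== VERDICT (by name: the statement is the Claim_ definition above) =====
theorem maximumMinimumPath_spec : Claim_equal_maximumMinimumPath := by
  intro A _ _
  show maximumMinimumPath A = maximumMinimumPath_alt A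
  exact pvMain_eq A
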